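-- pv_equiv track=rewrite | github.com/LesyaLesya/codewars_python | 7kyu.py | solve
-- ===== SOURCE A (Python) =====
-- import string
--
-- def solve(st,k):
--     letters = string.ascii_lowercase
--     for i in letters:
--         count = st.count(i)
--         if count <= k:
--             st = st.replace(i, '')
--             k -= count
--         else:
--             st = st.replace(i, '', k)
--             break
--     return st
-- ===== SOURCE B (Python) =====
-- import string
--
-- def solve(st, k):
--     # one-pass frequency table, per-letter removal budgets a->z, then one filtering pass
--     freq = {}
--     for ch in st:
--         freq[ch] = freq.get(ch, 0) + 1
--     budget = {}
--     remaining = k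
--     for c in string.ascii_lowercase:
--         if remaining <= 0:
--             break
--         take = min(freq.get(c, 0), remaining)
--         if take != 0:
--             budget[c] = take
--             remaining -= take
--     out = []
--     for ch in st:
--         b = budget.get(ch, 0)
--         if b != 0:
--             budget[ch] = b - 1
--         else:
--             out.append(ch)
--     return ''.join(out)
-- ===== Notes on version B (the rewrite author's own statement) =====
-- stated objective: simpler
-- what changed: Replaces A's per-letter count-and-replace scans (string rebuilt up to 26 times) by one frequency pass, a per-letter removal-budget table allocated a->z, and a single filtering pass over the string.
-- intended difference: For k < 0 with 'a' present in st, A's str.replace with a negative count strips every 'a' from st, while B removes nothing, the intended result of removing a non-positive number of letters. — e.g. on solve("banana", -1): A returns "bnn", B returns "banana"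
import Mathlib
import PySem

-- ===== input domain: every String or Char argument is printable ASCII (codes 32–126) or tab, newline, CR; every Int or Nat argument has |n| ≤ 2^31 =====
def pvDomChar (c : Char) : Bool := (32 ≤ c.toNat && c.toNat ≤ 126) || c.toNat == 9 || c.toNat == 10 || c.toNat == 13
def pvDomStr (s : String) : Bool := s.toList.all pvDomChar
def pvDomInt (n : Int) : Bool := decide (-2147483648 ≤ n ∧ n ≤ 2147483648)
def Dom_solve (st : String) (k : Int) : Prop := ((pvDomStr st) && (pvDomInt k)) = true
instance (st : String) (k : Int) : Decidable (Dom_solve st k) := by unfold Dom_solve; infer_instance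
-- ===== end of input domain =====

-- B replaces A's 26 count/replace scans by one frequency pass, a per-letter budget table and one filtering pass;
-- on k < 0 A's str.replace(…, -n) accidentally strips every 'a' while B removes nothing (stated as D_solve below).

-- ===== PORT A =====
-- hand port of st.replace(c, '', n) for a single-char pattern and empty replacement:
-- Python removes the first n occurrences of c, and ALL of them when n < 0 (exact on this shape)
def pyReplaceCount : List Char → Char → Int → List Char
  | [], _, _ => []
  | x :: xs, c, n =>
    if n = 0 then x :: xs
    else if x = c then pyReplaceCount xs c (n - 1)
    else x :: pyReplaceCount xs c n

def solveGo : List Char → List Char → Int → List Char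
  | [], st, _ => st
  | i :: ls, st, k =>
    let count : Int := (PySem.Chars.count st [i] : Int)
    if count ≤ k then solveGo ls (PySem.Chars.replace st [i] []) (k - count)
    else pyReplaceCount st i k

def solve (st : String) (k : Int) : String :=
  String.ofList (solveGo "abcdefghijklmnopqrstuvwxyz".toList st.toList k)

-- ===== PORT B =====
def bbGo (f : PySem.Dict Char Int) : List Char → PySem.Dict Char Int → Int → PySem.Dict Char Int
  | [], d, _ => d
  | c :: cs, d, r =>
    if r ≤ 0 then d
    else
      let take := min (f.getD c 0) r
      if take ≠ 0 then bbGo f cs (d.insert c take) (r - take)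
      else bbGo f cs d r

def stripGo : PySem.Dict Char Int → List Char → List Char
  | _, [] => []
  | d, x :: xs =>
    let b := d.getD x 0
    if b ≠ 0 then stripGo (d.insert x (b - 1)) xs
    else x :: stripGo d xs

def solve_alt (st : String) (k : Int) : String :=
  String.ofList (stripGo
    (bbGo (st.toList.foldl (fun d ch => d.insert ch (d.getD ch 0 + 1)) PySem.Dict.empty)
      "abcdefghijklmnopqrstuvwxyz".toList PySem.Dict.empty k)
    st.toList)

-- ===== PRECONDITION & SPEC =====
-- On k < 0 with 'a' present, A returns st stripped of every 'a' (str.replace with a negative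
-- count replaces all), while B removes nothing — the intended result of removing a non-positive
-- number of letters.
def D_solve (st : String) (k : Int) : Prop := k < 0 ∧ 'a' ∈ st.toList
instance (st : String) (k : Int) : Decidable (D_solve st k) := by unfold D_solve; infer_instance

def Spec_solve (st : String) (k : Int) (out : String) : Prop := ¬ D_solve st k → out = solve_alt st k
instance (st : String) (k : Int) (out : String) : Decidable (Spec_solve st k out) := by unfold Spec_solve; infer_instance

def pvDiffWitness_solve : String × Int := ("banana", -1)
def pvDiffWitnessOut_solve : String × String := ("bnn", "banana")

-- ===== CLAIM (what is proved, stated in full; the proofs are below) =====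
def Claim_unchanged_solve : Prop := ∀ (st : String) (k : Int), Dom_solve st k → Spec_solve st k (solve st k)
def Claim_changed_solve : Prop := Dom_solve (pvDiffWitness_solve.1) (pvDiffWitness_solve.2) ∧ D_solve (pvDiffWitness_solve.1) (pvDiffWitness_solve.2) ∧ solve (pvDiffWitness_solve.1) (pvDiffWitness_solve.2) = pvDiffWitnessOut_solve.1 ∧ solve_alt (pvDiffWitness_solve.1) (pvDiffWitness_solve.2) = pvDiffWitnessOut_solve.2 ∧ pvDiffWitnessOut_solve.1 ≠ pvDiffWitnessOut_solve.2
def Claim_exact_solve : Prop := ∀ (st : String) (k : Int), Dom_solve st k → D_solve st k → solve st k ≠ solve_alt st k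

-- ===== LEMMAS AND PROOFS =====

theorem countGo_singleton (c : Char) (xs : List Char) : ∀ (fuel acc : Nat),
    xs.length ≤ fuel →
    PySem.Chars.count.go [c] fuel xs acc = acc + xs.count c := by
  induction xs with
  | nil => intro fuel acc h; cases fuel <;> simp [PySem.Chars.count.go]
  | cons x t ih =>
    intro fuel acc h
    cases fuel with
    | zero => simp at h
    | succ f =>
      by_cases hx : x = c
      · subst hx
        simp [PySem.Chars.count.go, List.isPrefixOf, ih f (acc+1) (by simpa using h)]
        ring
      · simp [PySem.Chars.count.go, List.isPrefixOf, hx, ih f acc (by simpa using h),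
              Ne.symm hx]

theorem count_singleton (cs : List Char) (c : Char) :
    PySem.Chars.count cs [c] = cs.count c := by
  simpa [PySem.Chars.count] using countGo_singleton c cs cs.length 0 le_rfl

theorem replaceGo_singleton (c : Char) (xs : List Char) : ∀ (fuel : Nat) (acc : List Char),
    xs.length ≤ fuel →
    PySem.Chars.replace.go [c] [] fuel xs acc = acc.reverse ++ xs.filter (fun x => decide (x ≠ c)) := by
  induction xs with
  | nil => intro fuel acc h; cases fuel <;> simp [PySem.Chars.replace.go]
  | cons x t ih =>
    intro fuel acc h
    cases fuel with
    | zero => simp at h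
    | succ f =>
      by_cases hx : x = c
      · subst hx
        simp [PySem.Chars.replace.go, List.isPrefixOf, ih f acc (by simpa using h)]
      · simp [PySem.Chars.replace.go, List.isPrefixOf, ih f (x :: acc) (by simpa using h),
              Ne.symm hx, hx]

theorem replace_singleton (cs : List Char) (c : Char) :
    PySem.Chars.replace cs [c] [] = cs.filter (fun x => decide (x ≠ c)) := by
  simpa [PySem.Chars.replace] using replaceGo_singleton c cs cs.length [] le_rfl

theorem pyReplaceCount_zero (xs : List Char) (c : Char) : pyReplaceCount xs c 0 = xs := by
  cases xs <;> simp [pyReplaceCount]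

theorem pyReplaceCount_neg (c : Char) (xs : List Char) : ∀ (n : Int), n < 0 →
    pyReplaceCount xs c n = xs.filter (fun x => decide (x ≠ c)) := by
  induction xs with
  | nil => intro n h; simp [pyReplaceCount]
  | cons x t ih =>
    intro n h
    simp only [pyReplaceCount]
    rw [if_neg (by omega : ¬ n = 0)]
    by_cases hx : x = c
    · subst hx
      rw [if_pos rfl, ih (n-1) (by omega)]
      simp
    · rw [if_neg hx, ih n h]
      simp [hx]

theorem stripGo_of_zero (xs : List Char) : ∀ (d : PySem.Dict Char Int),
    (∀ x ∈ xs, d.getD x 0 = 0) → stripGo d xs = xs := by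
  induction xs with
  | nil => intro d _; simp [stripGo]
  | cons x t ih =>
    intro d h
    have hb : d.getD x 0 = 0 := h x (List.mem_cons_self)
    simp [stripGo, hb]
    exact ih d (fun y hy => h y (List.mem_cons_of_mem _ hy))

theorem bbGo_nonpos (f : PySem.Dict Char Int) (ls : List Char) (d : PySem.Dict Char Int)
    (r : Int) (h : r ≤ 0) : bbGo f ls d r = d := by
  cases ls <;> simp [bbGo, h]

theorem bbGo_agree (f : PySem.Dict Char Int) (l : Char) (ls : List Char) :
    ∀ (d d' : PySem.Dict Char Int) (r : Int), l ∉ ls →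
    (∀ c, c ≠ l → d.getD c 0 = d'.getD c 0) →
    ((∀ c, c ≠ l → (bbGo f ls d r).getD c 0 = (bbGo f ls d' r).getD c 0) ∧
      (bbGo f ls d r).getD l 0 = d.getD l 0) := by
  induction ls with
  | nil => intro d d' r _ hagree; simpa [bbGo] using hagree
  | cons c cs ih =>
    intro d d' r hnot hagree
    have hl : l ∉ cs := fun h => hnot (List.mem_cons_of_mem _ h)
    have hcl : c ≠ l := fun e => hnot (e ▸ List.mem_cons_self)
    by_cases hr : r ≤ 0
    · simpa [bbGo, hr] using hagree
    · by_cases ht : min (f.getD c 0) r = 0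
      · simpa [bbGo, hr, ht] using ih d d' r hl hagree
      · have hagree' : ∀ c', c' ≠ l →
            (d.insert c (min (f.getD c 0) r)).getD c' 0 = (d'.insert c (min (f.getD c 0) r)).getD c' 0 := by
          intro c' hc'
          rw [PySem.Dict.getD_insert, PySem.Dict.getD_insert]
          split_ifs with h1
          · rfl
          · exact hagree c' hc'
        have := ih (d.insert c (min (f.getD c 0) r)) (d'.insert c (min (f.getD c 0) r))
          (r - min (f.getD c 0) r) hl hagree'
        refine ⟨?_, ?_⟩
        · intro c' hc'; simpa [bbGo, hr, ht] using this.1 c' hc'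
        · have h2 : (d.insert c (min (f.getD c 0) r)).getD l 0 = d.getD l 0 := by
            rw [PySem.Dict.getD_insert]; simp [Ne.symm hcl]
          simpa [bbGo, hr, ht, h2] using this.2

theorem stripGo_filter (l : Char) (xs : List Char) :
    ∀ (d d' : PySem.Dict Char Int),
    (∀ c, c ≠ l → d.getD c 0 = d'.getD c 0) →
    ((xs.count l : Int) ≤ d.getD l 0) →
    stripGo d xs = stripGo d' (xs.filter (fun x => decide (x ≠ l))) := by
  induction xs with
  | nil => intro d d' _ _; simp [stripGo]
  | cons x t ih =>
    intro d d' hagree hcnt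
    by_cases hx : x = l
    · subst hx
      have h1 : (1 : Int) ≤ d.getD x 0 := by
        simp [List.count_cons_self] at hcnt
        omega
      have hb : ¬ d.getD x 0 = 0 := by omega
      have hagree' : ∀ c, c ≠ x → (d.insert x (d.getD x 0 - 1)).getD c 0 = d'.getD c 0 := by
        intro c hc; rw [PySem.Dict.getD_insert]; simp [hc]; exact hagree c hc
      have hcnt' : ((t.count x : Int)) ≤ (d.insert x (d.getD x 0 - 1)).getD x 0 := by
        rw [PySem.Dict.getD_insert]; simp
        simp [List.count_cons_self] at hcnt
        omega
      simpa [stripGo, hb] using ih (d.insert x (d.getD x 0 - 1)) d' hagree' hcnt'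
    · have hbeq : d.getD x 0 = d'.getD x 0 := hagree x hx
      have hcnt2 : ((t.count l : Int)) ≤ d.getD l 0 := by
        rw [List.count_cons_of_ne (by exact hx)] at hcnt; exact hcnt
      by_cases hz : d.getD x 0 = 0
      · simp [stripGo, hz, ← hbeq, hx]
        simpa using ih d d' hagree hcnt2
      · have hagree' : ∀ c, c ≠ l →
            (d.insert x (d.getD x 0 - 1)).getD c 0 = (d'.insert x (d'.getD x 0 - 1)).getD c 0 := by
          intro c hc
          rw [PySem.Dict.getD_insert, PySem.Dict.getD_insert]
          split_ifs with h1
          · rw [hbeq]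
          · exact hagree c hc
        have hcnt' : ((t.count l : Int)) ≤ (d.insert x (d.getD x 0 - 1)).getD l 0 := by
          rw [PySem.Dict.getD_insert]; simp [Ne.symm hx]; exact hcnt2
        simpa [stripGo, hz, ← hbeq, hx] using
          ih (d.insert x (d.getD x 0 - 1)) (d'.insert x (d'.getD x 0 - 1)) hagree' hcnt'

theorem stripGo_single (l : Char) (xs : List Char) :
    ∀ (d : PySem.Dict Char Int) (n : Int), 0 ≤ n →
    (∀ c, c ≠ l → d.getD c 0 = 0) → d.getD l 0 = n →
    stripGo d xs = pyReplaceCount xs l n := by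
  induction xs with
  | nil => intro d n _ _ _; simp [stripGo, pyReplaceCount]
  | cons x t ih =>
    intro d n hn hzero hl
    by_cases hn0 : n = 0
    · subst hn0
      have hall : ∀ y ∈ x :: t, d.getD y 0 = 0 := by
        intro y _; by_cases hy : y = l
        · rw [hy]; exact hl
        · exact hzero y hy
      rw [stripGo_of_zero _ d hall]
      simp [pyReplaceCount]
    · by_cases hx : x = l
      · subst hx
        have hb : ¬ d.getD x 0 = 0 := by rw [hl]; exact hn0
        have hz' : ∀ c, c ≠ x → (d.insert x (n - 1)).getD c 0 = 0 := by
          intro c hc; rw [PySem.Dict.getD_insert]; simp [hc]; exact hzero c hc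
        have hl' : (d.insert x (n - 1)).getD x 0 = n - 1 := by
          rw [PySem.Dict.getD_insert]; simp
        have := ih (d.insert x (n - 1)) (n - 1) (by omega) hz' hl'
        simpa [stripGo, hb, hl, pyReplaceCount, hn0] using this
      · have hb : d.getD x 0 = 0 := hzero x hx
        simpa [stripGo, hb, pyReplaceCount, hn0, hx] using ih d n hn hzero hl

theorem main_eq (ls : List Char) :
    ∀ (st : List Char) (k : Int) (f : PySem.Dict Char Int), 0 ≤ k → ls.Nodup →
    (∀ c ∈ ls, f.getD c 0 = (st.count c : Int)) →
    solveGo ls st k = stripGo (bbGo f ls PySem.Dict.empty k) st := by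
  induction ls with
  | nil =>
    intro st k f _ _ _
    simp [solveGo, bbGo]
    exact (stripGo_of_zero st _ (fun x _ => by simp [pysem])).symm
  | cons i ls ih =>
    intro st k f hk hnd hf
    have hfi : f.getD i 0 = (st.count i : Int) := hf i (List.mem_cons_self)
    have hfl : ∀ c ∈ ls, f.getD c 0 = (st.count c : Int) := fun c hc => hf c (List.mem_cons_of_mem _ hc)
    have hnd' : ls.Nodup := (List.nodup_cons.mp hnd).2
    have hil : i ∉ ls := (List.nodup_cons.mp hnd).1
    by_cases hck : ((st.count i : Int)) ≤ k
    · rw [show solveGo (i :: ls) st k =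
            solveGo ls (PySem.Chars.replace st [i] []) (k - (PySem.Chars.count st [i] : Int)) by
          simp [solveGo, count_singleton, hck]]
      rw [count_singleton, replace_singleton]
      by_cases hc0 : st.count i = 0
      · have hfilter : st.filter (fun x => decide (x ≠ i)) = st := by
          rw [List.filter_eq_self]
          intro a ha
          simp only [decide_eq_true_eq]
          intro e; subst e
          exact absurd ha (List.count_eq_zero.mp hc0)
        rw [hfilter, hc0]
        by_cases hk0 : k ≤ 0
        · rw [show bbGo f (i :: ls) PySem.Dict.empty k = PySem.Dict.empty from bbGo_nonpos f _ _ k hk0,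
              ← bbGo_nonpos f ls PySem.Dict.empty k hk0]
          simpa using ih st k f hk hnd' hfl
        · have hmin : min (f.getD i 0) k = 0 := by rw [hfi, hc0]; simp; omega
          rw [show bbGo f (i :: ls) PySem.Dict.empty k = bbGo f ls PySem.Dict.empty k by
            simp [bbGo, hk0, hmin]]
          simpa using ih st k f hk hnd' hfl
      · have h1 : (1 : Int) ≤ (st.count i : Int) := by exact_mod_cast Nat.one_le_iff_ne_zero.mpr hc0
        have hk0 : ¬ k ≤ 0 := by omega
        have hmin : min (f.getD i 0) k = (st.count i : Int) := by rw [hfi]; exact min_eq_left hck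
        have hmin0 : ¬ min (f.getD i 0) k = 0 := by omega
        rw [show bbGo f (i :: ls) PySem.Dict.empty k =
              bbGo f ls (PySem.Dict.empty.insert i (st.count i : Int)) (k - (st.count i : Int)) by
            simp [bbGo, hk0, hmin]
            exact fun h => absurd h hc0]
        have hfl' : ∀ c ∈ ls, f.getD c 0 = ((st.filter (fun x => decide (x ≠ i))).count c : Int) := by
          intro c hc
          rw [List.count_filter (by simp [show c ≠ i from fun e => hil (e ▸ hc)])]
          exact hfl c hc
        rw [ih (st.filter (fun x => decide (x ≠ i))) (k - (st.count i : Int)) f (by omega) hnd' hfl']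
        have hag := bbGo_agree f i ls (PySem.Dict.empty.insert i (st.count i : Int)) PySem.Dict.empty
          (k - (st.count i : Int)) hil
          (by intro c hc; rw [PySem.Dict.getD_insert]; simp [hc])
        refine (stripGo_filter i st _ _ hag.1 ?_).symm
        rw [hag.2, PySem.Dict.getD_insert]; simp
    · rw [show solveGo (i :: ls) st k = pyReplaceCount st i k by
          simp [solveGo, count_singleton, hck]]
      by_cases hk0 : k ≤ 0
      · have hkz : k = 0 := le_antisymm hk0 hk
        subst hkz
        rw [bbGo_nonpos f _ _ 0 le_rfl, pyReplaceCount_zero]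
        exact (stripGo_of_zero st _ (fun x _ => by simp [pysem])).symm
      · have hmin : min (f.getD i 0) k = k := by rw [hfi]; exact min_eq_right (by omega)
        have hmin0 : ¬ min (f.getD i 0) k = 0 := by omega
        rw [show bbGo f (i :: ls) PySem.Dict.empty k = PySem.Dict.empty.insert i k by
            simp [bbGo, hk0, hmin, bbGo_nonpos f ls _ 0 le_rfl]
            exact fun h => absurd h (by omega : ¬ k = 0)]
        refine (stripGo_single i st _ k hk ?_ ?_).symm
        · intro c hc; rw [PySem.Dict.getD_insert]; simp [hc, pysem]
        · rw [PySem.Dict.getD_insert]; simp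

-- ===== VERDICT (by name: the statement is the Claim_ definition above) =====
theorem solve_spec : Claim_unchanged_solve := by
  intro st k _ hnD
  have hfreq : ∀ c ∈ "abcdefghijklmnopqrstuvwxyz".toList,
      (st.toList.foldl (fun d ch => d.insert ch (d.getD ch 0 + 1)) PySem.Dict.empty).getD c 0
        = (st.toList.count c : Int) := by
    intro c _
    rw [PySem.Dict.getD_foldl_insert_add_one]
    simp [pysem]
  by_cases hk : 0 ≤ k
  · unfold solve solve_alt
    exact congrArg String.ofList
      (main_eq _ st.toList k _ hk (by decide) hfreq)
  · have ha : 'a' ∉ st.toList := by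
      intro hmem
      exact hnD ⟨by omega, hmem⟩
    unfold solve solve_alt
    rw [bbGo_nonpos _ _ _ k (by omega)]
    rw [stripGo_of_zero _ _ (fun x _ => by simp [pysem])]
    have hc0 : st.toList.count 'a' = 0 := List.count_eq_zero.mpr ha
    have : ¬ ((st.toList.count 'a' : Int)) ≤ k := by rw [hc0]; push_cast; omega
    rw [show solveGo "abcdefghijklmnopqrstuvwxyz".toList st.toList k
          = pyReplaceCount st.toList 'a' k by
        simp [solveGo, count_singleton, this]]
    rw [pyReplaceCount_neg 'a' st.toList k (by omega)]
    congr 1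
    rw [List.filter_eq_self]
    intro a hmem
    simp only [decide_eq_true_eq]
    intro e; subst e; exact ha hmem

theorem solve_changed : Claim_changed_solve := by
  unfold Claim_changed_solve; decide

theorem solve_tight : Claim_exact_solve := by
  intro st k _ hD
  obtain ⟨hk, ha⟩ := hD
  unfold solve solve_alt
  rw [bbGo_nonpos _ _ _ k (by omega)]
  rw [stripGo_of_zero _ _ (fun x _ => by simp [pysem])]
  have hc : ¬ ((st.toList.count 'a' : Int)) ≤ k := by
    have : 1 ≤ st.toList.count 'a' := List.one_le_count_iff.mpr ha
    have : (1 : Int) ≤ (st.toList.count 'a' : Int) := by exact_mod_cast this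
    omega
  rw [show solveGo "abcdefghijklmnopqrstuvwxyz".toList st.toList k
        = pyReplaceCount st.toList 'a' k by
      simp [solveGo, count_singleton, hc]]
  rw [pyReplaceCount_neg 'a' st.toList k (by omega)]
  intro heq
  have hfe : st.toList.filter (fun x => decide (x ≠ 'a')) = st.toList := by
    have := congrArg String.toList heq
    simpa using this
  rw [← hfe] at ha
  simp at ha
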